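-- pv_equiv track=rewrite | github.com/AlejoPrietoDavalos/NLP_Keras | RedesRecurrentes_RNN.py | string_to_array
-- ===== SOURCE A (Python) =====
-- def string_to_array(string, separadores):
--     """ Convierte el string en una lista separada por cada elemento del separadores."""
--     lista = []
--     i=0
--     for j, l in enumerate(string):
--         if l in separadores:
--             palabra = string[i:j]
--             if palabra!="":
--                 lista.append(palabra)
--             lista.append(l)
--             i = j+1
--     return lista
-- ===== SOURCE B (Python) =====
-- def string_to_array(string, separadores):
--     """Run-based rewrite: scan maximal runs of separator / non-separator
--     characters; a non-separator run becomes the pending word, a separator run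
--     first flushes the pending word then emits each separator char.  The pending
--     word is never flushed after the loop, matching A's dropping of trailing text."""
--     out = []
--     pending = ''
--     n = len(string)
--     k = 0
--     while k < n:
--         is_sep = string[k] in separadores
--         j = k + 1
--         while j < n and ((string[j] in separadores) == is_sep):
--             j += 1
--         run = string[k:j]
--         if is_sep:
--             if pending:
--                 out.append(pending)
--                 pending = ''
--             out.extend(run)
--         else:
--             pending = run
--         k = j
--     return out
-- ===== Notes on version B (the rewrite author's own statement) =====
-- stated objective: alternative
-- what changed: Replaced A's enumerate-and-slice pass (tracking the index after the last separator and slicing the word out of the string) with a run-based scan that extracts maximal runs of separator/non-separator characters and maintains a pending word, emitting each separator run character by character.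
import Mathlib
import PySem

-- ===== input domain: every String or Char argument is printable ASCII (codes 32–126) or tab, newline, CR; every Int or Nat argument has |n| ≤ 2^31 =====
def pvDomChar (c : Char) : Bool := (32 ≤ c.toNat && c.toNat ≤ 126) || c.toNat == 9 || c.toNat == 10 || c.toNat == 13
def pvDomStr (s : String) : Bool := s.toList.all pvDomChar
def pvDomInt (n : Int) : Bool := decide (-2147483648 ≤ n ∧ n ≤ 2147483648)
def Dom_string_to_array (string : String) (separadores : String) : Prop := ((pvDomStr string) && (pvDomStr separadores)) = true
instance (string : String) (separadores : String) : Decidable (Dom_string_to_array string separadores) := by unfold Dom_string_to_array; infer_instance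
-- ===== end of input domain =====

-- B rewrites A's index/slice scan as a run-based scan (maximal separator / non-separator
-- runs with a pending word); objective: alternative decomposition, same behaviour
-- (including A's dropping of any text after the last separator).

-- ===== PORT A =====
-- one step of A's loop body: state = (lista, i), element = (j, l) from enumerate(string)
def stepA (seps : List Char) (cs : List Char) (st : List String × Int) (jl : Int × Char) : List String × Int :=
  if jl.2 ∈ seps then
    let palabra := PySem.List.slice cs (some st.2) (some jl.1)
    ((if palabra ≠ [] then st.1 ++ [String.ofList palabra] else st.1) ++ [String.ofList [jl.2]], jl.1 + 1)
  else st

def string_to_array (string : String) (separadores : String) : List String :=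
  ((PySem.List.enumerate string.toList 0).foldl (stepA separadores.toList string.toList) ([], 0)).1

-- ===== PORT B =====
-- run-based scan: take the maximal run of characters with the same separator-status
-- as the head; a separator run flushes the pending word then emits each character,
-- a non-separator run becomes the pending word (never flushed at the end).
def altGo (seps : List Char) (out : List String) (pending : List Char) : List Char → List String
  | [] => out
  | c :: rest =>
    let isSep := decide (c ∈ seps)
    let run := c :: rest.takeWhile (fun d => decide (d ∈ seps) == isSep)
    let rest' := rest.dropWhile (fun d => decide (d ∈ seps) == isSep)
    if isSep then
      altGo seps ((if pending ≠ [] then out ++ [String.ofList pending] else out)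
                    ++ run.map (fun d => String.ofList [d])) [] rest'
    else
      altGo seps out run rest'
  termination_by s => s.length
  decreasing_by
    all_goals
      have := List.length_dropWhile_le (fun d => decide (d ∈ seps) == decide (c ∈ seps)) rest
      simp only [List.length_cons]
      omega

def string_to_array_alt (string : String) (separadores : String) : List String :=
  altGo separadores.toList [] [] string.toList

-- ===== PRECONDITION & SPEC =====
def Spec_string_to_array (string : String) (separadores : String) (out : List String) : Prop := out = string_to_array_alt string separadores
instance (string : String) (separadores : String) (out : List String) : Decidable (Spec_string_to_array string separadores out) := by unfold Spec_string_to_array; infer_instance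

-- ===== CLAIM (what is proved, stated in full; the proofs are below) =====
def Claim_equal_string_to_array : Prop := ∀ (string : String) (separadores : String), Dom_string_to_array string separadores → Spec_string_to_array string separadores (string_to_array string separadores)

-- ===== LEMMAS AND PROOFS =====

-- common characterisation: core seps s w = tokens emitted on suffix s with current word w
def core (seps : List Char) : List Char → List Char → List String
  | [], _ => []
  | c :: cs, w =>
    if c ∈ seps then
      (if w ≠ [] then [String.ofList w] else []) ++ [String.ofList [c]] ++ core seps cs []
    else core seps cs (w ++ [c])

lemma foldA_core (seps cs : List Char) :
    ∀ (s : List Char) (i k : Int) (w : List Char) (lista : List String),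
      0 ≤ i → k = i + w.length → cs.drop i.toNat = w ++ s →
      ((PySem.List.enumerate s k).foldl (stepA seps cs) (lista, i)).1
        = lista ++ core seps s w := by
  intro s
  induction s with
  | nil => intro i k w lista hi hk hd; simp [PySem.List.enumerate_nil, core]
  | cons c t ih =>
    intro i k w lista hi hk hd
    rw [PySem.List.enumerate_cons]
    simp only [List.foldl_cons]
    by_cases hc : c ∈ seps
    · have hslice : PySem.List.slice cs (some i) (some k) = w := by
        rw [PySem.List.slice_toNat cs hi (by omega)]
        have : k.toNat - i.toNat = w.length := by omega
        rw [hd, this, List.take_left]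
      have hstep : stepA seps cs (lista, i) (k, c) =
          ((if w ≠ [] then lista ++ [String.ofList w] else lista) ++ [String.ofList [c]], k + 1) := by
        simp [stepA, hc, hslice]
      rw [hstep]
      rw [ih (k + 1) (k + 1) [] _ (by omega) (by simp) ?_]
      · simp [core, hc]
        by_cases hw : w = [] <;> simp [hw]
      · have h1 : (k + 1).toNat = i.toNat + (w.length + 1) := by omega
        rw [h1, ← List.drop_drop, hd]
        simp
    · have hstep : stepA seps cs (lista, i) (k, c) = (lista, i) := by
        simp [stepA, hc]
      rw [hstep]
      rw [ih i (k + 1) (w ++ [c]) lista hi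
            (by simp only [List.length_append, List.length_cons, List.length_nil]; push_cast; omega)
            (by rw [hd]; simp)]
      simp [core, hc]

lemma sepRun_core (seps : List Char) :
    ∀ (r rest : List Char), (∀ d ∈ r, d ∈ seps) →
      core seps (r ++ rest) [] = r.map (fun d => String.ofList [d]) ++ core seps rest [] := by
  intro r
  induction r with
  | nil => simp
  | cons c t ih =>
    intro rest h
    simp only [List.cons_append, core, h c (by simp)]
    simp [ih rest (fun d hd => h d (by simp [hd]))]

lemma nonSepRun_core (seps : List Char) :
    ∀ (r : List Char) (rest w : List Char), (∀ d ∈ r, d ∉ seps) →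
      core seps (r ++ rest) w = core seps rest (w ++ r) := by
  intro r
  induction r with
  | nil => simp
  | cons c t ih =>
    intro rest w h
    simp only [List.cons_append, core]
    rw [if_neg (h c (by simp)), ih rest (w ++ [c]) (fun d hd => h d (by simp [hd]))]
    simp

lemma altGo_core (seps : List Char) :
    ∀ (n : Nat) (s : List Char), s.length ≤ n →
      ∀ (out : List String) (w : List Char),
        (w = [] ∨ ∀ d, s.head? = some d → d ∈ seps) →
        altGo seps out w s = out ++ core seps s w := by
  intro n
  induction n with
  | zero =>
    intro s hs out w _
    have : s = [] := by cases s <;> simp_all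
    subst this; simp [altGo, core]
  | succ n ih =>
    intro s hs out w hw
    cases s with
    | nil => simp [altGo, core]
    | cons c rest =>
      rw [altGo]
      set p := fun d => decide (d ∈ seps) == decide (c ∈ seps) with hp
      have hsplit : rest.takeWhile p ++ rest.dropWhile p = rest := List.takeWhile_append_dropWhile
      have hlen : (rest.dropWhile p).length ≤ n := by
        have := List.length_dropWhile_le p rest
        simp at hs; omega
      by_cases hc : c ∈ seps
      · simp only [hc, decide_true, if_true]
        rw [ih (rest.dropWhile p) hlen _ [] (Or.inl rfl)]
        have hrun : ∀ d ∈ rest.takeWhile p, d ∈ seps := by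
          intro d hd
          have := List.mem_takeWhile_imp hd
          simp [hp, hc] at this; exact this
        have : core seps (c :: rest) w
            = (if w ≠ [] then [String.ofList w] else []) ++ [String.ofList [c]]
              ++ ((rest.takeWhile p).map (fun d => String.ofList [d]) ++ core seps (rest.dropWhile p) []) := by
          simp only [core, if_pos hc]
          rw [← hsplit, sepRun_core seps _ _ hrun]
          simp [hsplit]
        rw [this]
        by_cases hwnil : w = [] <;> simp [hwnil]
      · simp only [hc, decide_false, Bool.false_eq_true, if_false]
        have hwz : w = [] := by
          rcases hw with h | h
          · exact h
          · exact absurd (h c rfl) hc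
        subst hwz
        have hrun : ∀ d ∈ c :: rest.takeWhile p, d ∉ seps := by
          intro d hd
          rcases List.mem_cons.mp hd with rfl | hd'
          · exact hc
          · have := List.mem_takeWhile_imp hd'
            simp [hp, hc] at this; exact this
        rw [ih (rest.dropWhile p) hlen out (c :: rest.takeWhile p) ?_]
        · have : core seps (c :: rest) []
              = core seps (rest.dropWhile p) (c :: rest.takeWhile p) := by
            have := nonSepRun_core seps (c :: rest.takeWhile p) (rest.dropWhile p) [] hrun
            simpa [hsplit] using this
          rw [this]
        · right
          intro d hd
          have hne := List.head?_dropWhile_not p rest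
          rw [hd] at hne
          simp [hp, hc] at hne
          exact hne

-- ===== VERDICT (by name: the statement is the Claim_ definition above) =====
theorem string_to_array_spec : Claim_equal_string_to_array := by
  intro string separadores _
  unfold Spec_string_to_array string_to_array string_to_array_alt
  rw [foldA_core separadores.toList string.toList string.toList 0 0 [] [] le_rfl (by simp) (by simp)]
  rw [altGo_core separadores.toList string.toList.length string.toList le_rfl [] [] (Or.inl rfl)]
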